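-- pv_equiv track=rewrite | github.com/kunalreddy126624/CloudSizer | data-platform/apps/api/app/services/toon.py | _decode_path_segment
-- ===== SOURCE A (Python) =====
-- def _decode_path_segment(segment: str, line_number: int) -> str:
--     if "~" not in segment:
--         return segment
--
--     output: list[str] = []
--     index = 0
--     while index < len(segment):
--         char = segment[index]
--         if char != "~":
--             output.append(char)
--             index += 1
--             continue
--
--         if index + 1 >= len(segment):
--             raise ValueError(f"Invalid TOON row at line {line_number}: invalid '~' escape in path.")
--         escape = segment[index + 1]
--         if escape == "0":
--             output.append("~")
--         elif escape == "1":
--             output.append("/")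
--         else:
--             raise ValueError(f"Invalid TOON row at line {line_number}: invalid '~' escape in path.")
--         index += 2
--
--     return "".join(output)
-- ===== SOURCE B (Python) =====
-- def _decode_path_segment(segment: str, line_number: int) -> str:
--     if "~" not in segment:
--         return segment
--
--     out = []
--     i = len(segment) - 1
--     while i >= 0:
--         ch = segment[i]
--         if i > 0 and segment[i - 1] == "~":
--             if ch == "0":
--                 out.append("~")
--             elif ch == "1":
--                 out.append("/")
--             else:
--                 raise ValueError(f"Invalid TOON row at line {line_number}: invalid '~' escape in path.")
--             i -= 2
--         elif ch == "~":
--             raise ValueError(f"Invalid TOON row at line {line_number}: invalid '~' escape in path.")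
--         else:
--             out.append(ch)
--             i -= 1
--     return "".join(reversed(out))
-- ===== Notes on version B (the rewrite author's own statement) =====
-- stated objective: alternative
-- what changed: Replaces A's left-to-right index walk (which reads the escape character after each '~') with a right-to-left scan that recognises an escape by the preceding character, building the output back-to-front and reversing it once at the end.
import Mathlib
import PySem

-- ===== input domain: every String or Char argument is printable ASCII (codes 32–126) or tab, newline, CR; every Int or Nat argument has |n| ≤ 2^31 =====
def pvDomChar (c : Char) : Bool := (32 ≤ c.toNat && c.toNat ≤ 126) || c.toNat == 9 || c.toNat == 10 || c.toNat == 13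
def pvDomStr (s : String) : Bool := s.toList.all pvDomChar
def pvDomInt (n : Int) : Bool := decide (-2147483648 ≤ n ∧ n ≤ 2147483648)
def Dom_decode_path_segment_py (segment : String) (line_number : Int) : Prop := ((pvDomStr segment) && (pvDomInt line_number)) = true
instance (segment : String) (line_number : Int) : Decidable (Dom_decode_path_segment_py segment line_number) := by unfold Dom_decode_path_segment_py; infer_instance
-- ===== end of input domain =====

-- B scans the segment right-to-left, recognising an escape by the PRECEDING '~' and
-- building the output back-to-front, instead of A's left-to-right index walk
-- (objective: alternative). Both raise the same ValueError on invalid escapes;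
-- those inputs are outside Pre_.

-- ===== PORT A =====
-- while-loop of A: forward index walk over the characters; [] is returned where A
-- raises (those inputs are excluded by Pre_decode_path_segment_py).
def pvALoop : List Char → List Char
  | [] => []
  | c :: rest =>
    if c ≠ '~' then c :: pvALoop rest
    else match rest with
      | [] => []                                   -- raise ValueError (outside Pre_)
      | e :: rest' =>
        if e = '0' then '~' :: pvALoop rest'
        else if e = '1' then '/' :: pvALoop rest'
        else []                                    -- raise ValueError (outside Pre_)

def decode_path_segment_py (segment : String) (_line_number : Int) : String :=
  if PySem.Str.isIn "~" segment = false then segment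
  else String.ofList (pvALoop segment.toList)

-- ===== PORT B =====
-- B's backward while-loop, transcribed over the reversed character list: the head is
-- segment[i], the next element is segment[i-1]; [] where Source B raises (outside Pre_).
def pvBLoop : List Char → List Char
  | [] => []
  | [c] => if c = '~' then [] else [c]             -- i = 0: no preceding character
  | c :: p :: rest =>
    if p = '~' then                                -- segment[i-1] == '~'
      if c = '0' then '~' :: pvBLoop rest
      else if c = '1' then '/' :: pvBLoop rest
      else []                                      -- raise ValueError (outside Pre_)
    else if c = '~' then []                        -- raise ValueError (outside Pre_)
    else c :: pvBLoop (p :: rest)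

def decode_path_segment_py_alt (segment : String) (_line_number : Int) : String :=
  if PySem.Str.isIn "~" segment = false then segment
  else String.ofList (pvBLoop segment.toList.reverse).reverse  -- "".join(reversed(out))

-- ===== PRECONDITION & SPEC =====
-- Pre_ excludes exactly the inputs where A raises ValueError (a '~' not followed by
-- '0' or '1'); B raises the identical ValueError there.
def Pre_decode_path_segment_py (segment : String) (line_number : Int) : Prop :=
  ((segment.toList.zip (segment.toList.drop 1)).all
      (fun p => p.1 != '~' || p.2 == '0' || p.2 == '1')) = true ∧
    segment.toList.getLast? ≠ some '~'

instance (segment : String) (line_number : Int) : Decidable (Pre_decode_path_segment_py segment line_number) := by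
  unfold Pre_decode_path_segment_py; infer_instance

def pvWitness_decode_path_segment_py : String × Int := ("a~1b~0c", 3)

def Spec_decode_path_segment_py (segment : String) (line_number : Int) (out : String) : Prop := out = decode_path_segment_py_alt segment line_number
instance (segment : String) (line_number : Int) (out : String) : Decidable (Spec_decode_path_segment_py segment line_number out) := by unfold Spec_decode_path_segment_py; infer_instance

-- ===== CLAIM (what is proved, stated in full; the proofs are below) =====
def Claim_equal_decode_path_segment_py : Prop := ∀ (segment : String) (line_number : Int), Dom_decode_path_segment_py segment line_number → Pre_decode_path_segment_py segment line_number → Spec_decode_path_segment_py segment line_number (decode_path_segment_py segment line_number)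

-- ===== LEMMAS AND PROOFS =====

-- forward grammar of the valid strings
inductive pvValid : List Char → Prop
  | nil : pvValid []
  | lit (c : Char) (l : List Char) : c ≠ '~' → pvValid l → pvValid (c :: l)
  | esc (e : Char) (l : List Char) : (e = '0' ∨ e = '1') → pvValid l → pvValid ('~' :: e :: l)

lemma pvPre_valid : ∀ (n : Nat) (l : List Char), l.length ≤ n →
    ((l.zip (l.drop 1)).all (fun p => p.1 != '~' || p.2 == '0' || p.2 == '1')) = true →
    l.getLast? ≠ some '~' → pvValid l := by
  intro n
  induction n with
  | zero =>
    intro l hl _ _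
    have : l = [] := List.eq_nil_of_length_eq_zero (Nat.le_zero.mp hl)
    subst this; exact pvValid.nil
  | succ n ih =>
    intro l hl hz hlast
    match l with
    | [] => exact pvValid.nil
    | [c] =>
      have hc : c ≠ '~' := by simpa using hlast
      exact pvValid.lit c [] hc pvValid.nil
    | c :: d :: rest =>
      simp only [List.drop_one, List.tail_cons, List.zip_cons_cons, List.all_cons,
        Bool.and_eq_true] at hz
      have hlast' : (d :: rest).getLast? ≠ some '~' := by
        simpa [List.getLast?_cons_cons] using hlast
      have hlen : (d :: rest).length ≤ n := by simp at hl ⊢; omega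
      by_cases hc : c = '~'
      · subst hc
        have hd : d = '0' ∨ d = '1' := by
          have h1 := hz.1; simp at h1; tauto
        have hrest : pvValid rest := by
          refine ih rest (by simp at hlen; omega) ?_ ?_
          · cases rest with
            | nil => simp
            | cons r rs =>
              have h2 := hz.2
              simp only [List.drop_one, List.tail_cons, List.zip_cons_cons, List.all_cons,
                Bool.and_eq_true] at h2 ⊢
              exact h2.2
          · cases rest with
            | nil => simp
            | cons r rs => simpa [List.getLast?_cons_cons] using hlast'
        rcases hd with rfl | rfl
        · exact pvValid.esc '0' rest (Or.inl rfl) hrest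
        · exact pvValid.esc '1' rest (Or.inr rfl) hrest
      · refine pvValid.lit c _ hc (ih (d :: rest) hlen ?_ hlast')
        simpa only [List.drop_one, List.tail_cons] using hz.2

-- reversed grammar: reverses of valid strings
inductive pvR : List Char → Prop
  | nil : pvR []
  | lit (c : Char) (l : List Char) : c ≠ '~' → pvR l → pvR (c :: l)
  | esc (e : Char) (l : List Char) : (e = '0' ∨ e = '1') → pvR l → pvR (e :: '~' :: l)

lemma pvR_head (x : List Char) (h : pvR x) : ∀ l, x ≠ '~' :: l := by
  cases h with
  | nil => intro l hl; cases hl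
  | lit c l hc _ => intro l' hl'; exact hc (by injection hl')
  | esc e l he _ =>
    intro l' hl'
    have : e = '~' := by injection hl'
    rcases he with rfl | rfl <;> simp_all

lemma pvR_append_lit (x : List Char) (c : Char) (hc : c ≠ '~') (h : pvR x) :
    pvR (x ++ [c]) := by
  induction h with
  | nil => exact pvR.lit c [] hc pvR.nil
  | lit c' l hc' _ ih => exact pvR.lit c' _ hc' ih
  | esc e l he _ ih => exact pvR.esc e _ he ih

lemma pvR_append_esc (x : List Char) (e : Char) (he : e = '0' ∨ e = '1') (h : pvR x) :
    pvR (x ++ [e, '~']) := by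
  induction h with
  | nil => exact pvR.esc e [] he pvR.nil
  | lit c' l hc' _ ih => exact pvR.lit c' _ hc' ih
  | esc e' l he' _ ih => exact pvR.esc e' _ he' ih

lemma pvValid_pvR (l : List Char) (h : pvValid l) : pvR l.reverse := by
  induction h with
  | nil => exact pvR.nil
  | lit c l hc _ ih => simpa using pvR_append_lit l.reverse c hc ih
  | esc e l he _ ih =>
    have := pvR_append_esc l.reverse e he ih
    simpa using this

lemma pvBLoop_cons_lit (c : Char) (l : List Char) (hc : c ≠ '~') (h : pvR l) :
    pvBLoop (c :: l) = c :: pvBLoop l := by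
  match l with
  | [] => simp [pvBLoop, hc]
  | p :: rest =>
    have hp : p ≠ '~' := by
      intro hpe; exact pvR_head _ h rest (by rw [hpe])
    simp [pvBLoop, hp, hc]

lemma pvB_append_lit (x : List Char) (c : Char) (hc : c ≠ '~') (h : pvR x) :
    pvBLoop (x ++ [c]) = pvBLoop x ++ [c] := by
  induction h with
  | nil => simp [pvBLoop, hc]
  | lit c' l hc' hr ih =>
    have hr' : pvR (l ++ [c]) := pvR_append_lit l c hc hr
    rw [List.cons_append, pvBLoop_cons_lit c' _ hc' hr', ih,
        pvBLoop_cons_lit c' l hc' hr, List.cons_append]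
  | esc e l he hr ih =>
    rcases he with rfl | rfl <;>
      simp [pvBLoop, ih]

lemma pvB_append_esc (x : List Char) (e : Char) (he : e = '0' ∨ e = '1') (h : pvR x) :
    pvBLoop (x ++ [e, '~']) = pvBLoop x ++ [if e = '0' then '~' else '/'] := by
  induction h with
  | nil => rcases he with rfl | rfl <;> simp [pvBLoop]
  | lit c' l hc' hr ih =>
    have hr' : pvR (l ++ [e, '~']) := pvR_append_esc l e he hr
    rw [List.cons_append, pvBLoop_cons_lit c' _ hc' hr', ih,
        pvBLoop_cons_lit c' l hc' hr, List.cons_append]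
  | esc e' l he' hr ih =>
    rcases he' with rfl | rfl <;>
      simp [pvBLoop, ih]

lemma pvMain (l : List Char) (h : pvValid l) :
    pvBLoop l.reverse = (pvALoop l).reverse := by
  induction h with
  | nil => simp [pvBLoop, pvALoop]
  | lit c l hc hv ih =>
    have hr : pvR l.reverse := pvValid_pvR l hv
    have ha : pvALoop (c :: l) = c :: pvALoop l := by
      rw [pvALoop.eq_def]; simp [hc]
    rw [List.reverse_cons, pvB_append_lit l.reverse c hc hr, ih, ha, List.reverse_cons]
  | esc e l he hv ih =>
    have hr : pvR l.reverse := pvValid_pvR l hv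
    have hrev : ('~' :: e :: l).reverse = l.reverse ++ [e, '~'] := by simp
    have ha : pvALoop ('~' :: e :: l) = (if e = '0' then '~' else '/') :: pvALoop l := by
      rcases he with rfl | rfl <;> (rw [pvALoop.eq_def]; simp)
    rw [hrev, pvB_append_esc l.reverse e he hr, ih, ha, List.reverse_cons]

-- ===== VERDICT (by name: the statement is the Claim_ definition above) =====
theorem decode_path_segment_py_spec : Claim_equal_decode_path_segment_py := by
  intro segment line_number _ hpre
  unfold Spec_decode_path_segment_py decode_path_segment_py decode_path_segment_py_alt
  split_ifs with h
  · rfl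
  · have hv : pvValid segment.toList :=
      pvPre_valid segment.toList.length segment.toList le_rfl hpre.1 hpre.2
    rw [pvMain segment.toList hv, List.reverse_reverse]
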